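-- pv_equiv track=rewrite | github.com/Willippe00/Projet_UPC | driverDataSet.py | recombinaison_paquets
-- ===== SOURCE A (Python) =====
-- import itertools
--
-- def recombinaison_paquets(Rb_code):
--     # Séparation de la chaîne en mots
--     mots = Rb_code.split()
--
--     # Vérification du nombre de mots pour s'assurer qu'il y en a au moins 3
--     if len(mots) < 4:
--         return []
--
--     # Séparer les mots en paquets de 4
--     paquets = [mots[i:i + 4] for i in range(0, len(mots), 4)]
--
--     # Générer toutes les permutations des paquets
--     permutations_paquets = list(itertools.permutations(paquets))
--
--     # Rejoindre les mots pour former les chaînes possibles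
--     chaines_possibles = [' '.join(itertools.chain.from_iterable(permutation)) for permutation in
--                          permutations_paquets]
--
--     return chaines_possibles
-- ===== SOURCE B (Python) =====
-- def recombinaison_paquets(Rb_code):
--     mots = Rb_code.split()
--     if len(mots) < 4:
--         return []
--     paquets = [mots[i:i + 4] for i in range(0, len(mots), 4)]
--     out = []
--
--     def go(remaining, prefix):
--         if not remaining:
--             out.append(' '.join(prefix))
--             return
--         for i in range(len(remaining)):
--             go(remaining[:i] + remaining[i + 1:], prefix + remaining[i])
--
--     go(paquets, [])
--     return out
-- ===== Notes on version B (the rewrite author's own statement) =====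
-- stated objective: alternative
-- what changed: Replaces the itertools.permutations call plus the join-over-flattened-tuples comprehension by a hand-written depth-first recursion that picks packets by ascending index, carries the word prefix, and emits each joined string directly at the base case.
import Mathlib
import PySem

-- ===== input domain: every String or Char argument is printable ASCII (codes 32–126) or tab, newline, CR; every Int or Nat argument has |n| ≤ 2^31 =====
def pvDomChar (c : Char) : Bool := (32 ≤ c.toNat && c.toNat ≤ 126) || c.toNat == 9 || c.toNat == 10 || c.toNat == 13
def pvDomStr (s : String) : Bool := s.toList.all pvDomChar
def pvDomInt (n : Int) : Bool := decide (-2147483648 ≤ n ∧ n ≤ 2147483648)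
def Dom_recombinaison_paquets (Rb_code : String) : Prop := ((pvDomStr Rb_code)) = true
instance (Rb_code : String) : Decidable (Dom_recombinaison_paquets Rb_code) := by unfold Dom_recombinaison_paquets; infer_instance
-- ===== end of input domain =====

-- B replaces the itertools.permutations call + join comprehension by a direct DFS that
-- selects packets by ascending index and joins at the base case (objective: alternative).

-- ===== PORT A =====
def recombinaison_paquets (Rb_code : String) : List String :=
  let mots := PySem.Str.split₀ Rb_code
  if mots.length < 4 then []
  else
    let paquets := (PySem.List.pyRange 0 mots.length 4).map
      (fun i => PySem.List.slice mots (some i) (some (i + 4)))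
    let permutations_paquets := PySem.List.permutations paquets paquets.length
    permutations_paquets.map (fun perm => PySem.Str.join " " perm.flatten)

-- ===== PORT B =====
-- DFS: pick each remaining packet by ascending index, carry the word prefix.
def rpGo : List (List String) → List String → List String
  | [], pre => [PySem.Str.join " " pre]
  | x :: xs, pre =>
    (List.range (x :: xs).length).attach.flatMap
      (fun i => rpGo ((x :: xs).take i.1 ++ (x :: xs).drop (i.1 + 1)) (pre ++ (x :: xs).getD i.1 []))
termination_by rem _ => rem.length
decreasing_by
  have hi := List.mem_range.mp i.2
  simp only [List.length_take, List.length_drop, List.length_append, List.length_cons] at *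
  omega

def recombinaison_paquets_alt (Rb_code : String) : List String :=
  let mots := PySem.Str.split₀ Rb_code
  if mots.length < 4 then []
  else
    let paquets := (PySem.List.pyRange 0 mots.length 4).map
      (fun i => PySem.List.slice mots (some i) (some (i + 4)))
    rpGo paquets []

-- ===== PRECONDITION & SPEC =====
def Spec_recombinaison_paquets (Rb_code : String) (out : List String) : Prop := out = recombinaison_paquets_alt Rb_code
instance (Rb_code : String) (out : List String) : Decidable (Spec_recombinaison_paquets Rb_code out) := by unfold Spec_recombinaison_paquets; infer_instance

-- ===== CLAIM (what is proved, stated in full; the proofs are below) =====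
def Claim_equal_recombinaison_paquets : Prop := ∀ (Rb_code : String), Dom_recombinaison_paquets Rb_code → Spec_recombinaison_paquets Rb_code (recombinaison_paquets Rb_code)

-- ===== LEMMAS AND PROOFS =====

-- B's DFS over the remaining packets equals mapping join∘flatten over itertools-style
-- index-order permutations, with the already-chosen words generalized as `pre`.
theorem rpGo_eq (n : Nat) : ∀ (rem : List (List String)) (pre : List String),
    rem.length = n →
    rpGo rem pre = (PySem.List.permutations rem n).map
      (fun p => PySem.Str.join " " (pre ++ p.flatten)) := by
  induction n with
  | zero =>
    intro rem pre h
    have : rem = [] := List.length_eq_zero_iff.mp h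
    subst this
    simp only [rpGo]
    simp [PySem.List.permutations]
  | succ n ih =>
    intro rem pre h
    match rem, h with
    | x :: xs, h =>
      rw [rpGo.eq_2, List.flatMap_subtype]
      simp only [List.unattach_attach]
      rw [PySem.List.permutations.eq_2, List.map_flatMap]
      intro i hi
      have hlt : i < (x :: xs).length := List.mem_range.mp hi
      have hget : (x :: xs)[i]? = some ((x :: xs)[i]) := List.getElem?_eq_getElem hlt
      have hgetD : (x :: xs).getD i [] = (x :: xs)[i] := List.getD_eq_getElem _ _ hlt
      have herase : (x :: xs).eraseIdx i = (x :: xs).take i ++ (x :: xs).drop (i + 1) :=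
        List.eraseIdx_eq_take_drop_succ _ _
      have hlen : ((x :: xs).eraseIdx i).length = n := by
        rw [List.length_eraseIdx_of_lt hlt, h]; rfl
      rw [hget, hgetD, ← herase, ih _ _ hlen, List.map_map]
      apply List.map_congr_left
      intro p _
      simp [List.flatten_cons, List.append_assoc]

-- ===== VERDICT (by name: the statement is the Claim_ definition above) =====
theorem recombinaison_paquets_spec : Claim_equal_recombinaison_paquets := by
  intro Rb_code _
  unfold Spec_recombinaison_paquets recombinaison_paquets recombinaison_paquets_alt
  by_cases hlt : (PySem.Str.split₀ Rb_code).length < 4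
  · simp [hlt]
  · simp only [hlt, if_false]
    rw [rpGo_eq _ _ _ rfl]
    simp
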